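-- pv_equiv track=rewrite | github.com/SimonKocurek/Algorithms-and-Fun | python/knight-tour.py | knight_tours_from
-- ===== SOURCE A (Python) =====
-- KNIGHT_MOVEMENTS = (
--     (-1, -2), (1, -2), (-1, 2), (1, 2),
--     (-2, 1), (-2, -1), (2, 1), (2, -1)
-- )
--
-- def valid_move(x, y, used_tile):
--     return y >= 0 and y < len(used_tile) and \
--         x >= 0 and x < len(used_tile[0]) and \
--         not used_tile[y][x]
--
-- def knight_tours_from(x, y, used_tile, remaining_tiles):
--     result = 0
--
--     states = [(x, y, False)]
--     while len(states) > 0: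
--         x, y, going_back = states.pop()
--
--         if going_back:
--             remaining_tiles += 1
--             used_tile[y][x] = False
--             continue
--
--         else:
--             states.append((x, y, True))
--             used_tile[y][x] = True
--             remaining_tiles -= 1
--
--         if remaining_tiles == 0:
--             result += 1
--             continue
--
--         for x_change, y_change in KNIGHT_MOVEMENTS:
--             new_x, new_y = x + x_change, y + y_change
--
--             if valid_move(new_x, new_y, used_tile):
--                 states.append((new_x, new_y, False))
--
--     return result
-- ===== SOURCE B (Python) =====
-- # Plain recursive backtracking instead of the explicit stack machine with going_back
-- # markers; same return value, and the same in-place marking/unmarking of used_tile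
-- # (the board ends up in the same state as the original leaves it).
-- KNIGHT_MOVEMENTS = (
--     (-1, -2), (1, -2), (-1, 2), (1, 2),
--     (-2, 1), (-2, -1), (2, 1), (2, -1)
-- )
--
-- def valid_move(x, y, used_tile):
--     return y >= 0 and y < len(used_tile) and \
--         x >= 0 and x < len(used_tile[0]) and \
--         not used_tile[y][x]
--
-- def knight_tours_from(x, y, used_tile, remaining_tiles):
--     used_tile[y][x] = True
--     remaining_tiles -= 1
--
--     if remaining_tiles == 0:
--         count = 1
--     else:
--         count = 0
--         for x_change, y_change in KNIGHT_MOVEMENTS: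
--             new_x, new_y = x + x_change, y + y_change
--             if valid_move(new_x, new_y, used_tile):
--                 count += knight_tours_from(new_x, new_y, used_tile, remaining_tiles)
--
--     used_tile[y][x] = False
--     return count
-- ===== Notes on version B (the rewrite author's own statement) =====
-- stated objective: simpler
-- what changed: The explicit stack machine with (x, y, going_back) markers and an external remaining_tiles/result state is replaced by plain recursive backtracking that marks the square, recurses over the valid knight moves, and unmarks it before returning the accumulated count.
-- outside the precondition, e.g. on knight_tours_from(0, 0, [[False, False], [False]], 1): A returns 1, B returns 1
import Mathlib
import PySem

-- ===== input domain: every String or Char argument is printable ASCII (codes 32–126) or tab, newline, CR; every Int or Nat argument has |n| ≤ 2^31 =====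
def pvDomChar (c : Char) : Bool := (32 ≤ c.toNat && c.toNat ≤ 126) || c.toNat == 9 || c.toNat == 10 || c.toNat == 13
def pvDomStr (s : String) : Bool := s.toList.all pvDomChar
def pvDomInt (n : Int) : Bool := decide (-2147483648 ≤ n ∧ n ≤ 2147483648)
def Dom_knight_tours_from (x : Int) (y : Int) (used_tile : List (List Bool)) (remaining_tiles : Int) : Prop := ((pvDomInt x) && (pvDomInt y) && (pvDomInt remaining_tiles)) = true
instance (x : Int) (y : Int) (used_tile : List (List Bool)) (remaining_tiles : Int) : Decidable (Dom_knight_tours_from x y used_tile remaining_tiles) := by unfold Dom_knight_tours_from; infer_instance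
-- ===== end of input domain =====

-- B replaces A's explicit stack machine with `going_back` markers by plain recursive
-- backtracking (objective: simpler).  Both versions mutate `used_tile` in Python and leave
-- it in the same final state; the equivalence proved here is about the return value.

-- ===== shared helpers (used by both ports) =====
-- KNIGHT_MOVEMENTS
def kMoves : List (Int × Int) :=
  [(-1, -2), (1, -2), (-1, 2), (1, 2), (-2, 1), (-2, -1), (2, 1), (2, -1)]

-- used_tile[y][x] as a read (none = IndexError)
def getCell (b : List (List Bool)) (y x : Int) : Option Bool :=
  (PySem.List.pyGet? b y).bind fun row => PySem.List.pyGet? row x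

-- used_tile[y][x] = v (Python raises where the indices are out of range; those inputs are
-- outside Pre_, the port returns the board unchanged there)
def setCell (b : List (List Bool)) (y x : Int) (v : Bool) : List (List Bool) :=
  match PySem.List.pyGet? b y with
  | some row => PySem.List.pySetD b y (PySem.List.pySetD row x v)
  | none => b

-- number of free squares (proof-relevant measure; also sizes port A's fuel)
def countFalse (b : List (List Bool)) : Nat :=
  (b.map fun row => row.count false).sum

-- valid_move; where Python would raise IndexError reading a ragged short row
-- (excluded by Pre_), this returns false
def validMove (x y : Int) (b : List (List Bool)) : Bool :=
  decide (0 ≤ y) && decide (y < (b.length : Int)) && decide (0 ≤ x) &&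
    decide (x < ((b.headD []).length : Int)) && !(getCell b y x).getD true

-- ===== lemmas the ports need for termination (cited by decreasing_by) =====
lemma count_false_set_true : ∀ (row : List Bool) (j : Nat), row[j]? = some false →
    (row.set j true).count false + 1 = row.count false := by
  intro row
  induction row with
  | nil => intro j h; simp at h
  | cons a t ih =>
    intro j h
    cases j with
    | zero => simp_all
    | succ j =>
      simp only [List.getElem?_cons_succ] at h
      simp only [List.set_cons_succ, List.count_cons]
      have := ih j h
      omega

lemma countFalse_cons (r : List Bool) (t : List (List Bool)) :
    countFalse (r :: t) = r.count false + countFalse t := by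
  simp [countFalse]

lemma countFalse_set : ∀ (b : List (List Bool)) (k : Nat) (row r' : List Bool),
    b[k]? = some row →
    countFalse (b.set k r') + row.count false = countFalse b + r'.count false := by
  intro b
  induction b with
  | nil => intro k row r' h; simp at h
  | cons a t ih =>
    intro k row r' h
    cases k with
    | zero =>
      simp only [List.getElem?_cons_zero, Option.some.injEq] at h
      subst h
      simp [countFalse_cons]
      omega
    | succ k =>
      simp only [List.getElem?_cons_succ] at h
      simp only [List.set_cons_succ, countFalse_cons]
      have := ih k row r' h
      omega

lemma getCell_parts {b : List (List Bool)} {y x : Int} {c : Bool}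
    (h : getCell b y x = some c) :
    ∃ k row j, PySem.List.pyIdx? b.length y = some k ∧ b[k]? = some row ∧
      PySem.List.pyIdx? row.length x = some j ∧ row[j]? = some c := by
  unfold getCell PySem.List.pyGet? at h
  cases hk : PySem.List.pyIdx? b.length y with
  | none => simp [hk] at h
  | some k =>
    simp only [hk, Option.bind_some] at h
    cases hr : b[k]? with
    | none => simp [hr] at h
    | some row =>
      simp only [hr, Option.bind_some] at h
      cases hj : PySem.List.pyIdx? row.length x with
      | none => simp [hj] at h
      | some j =>
        simp only [hj, Option.bind_some] at h
        refine ⟨k, row, j, rfl, hr, hj, ?_⟩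
        exact h

lemma setCell_eq_of_parts {b : List (List Bool)} {y x : Int} {k j : Nat} {row : List Bool}
    (hk : PySem.List.pyIdx? b.length y = some k) (hr : b[k]? = some row)
    (hj : PySem.List.pyIdx? row.length x = some j) (v : Bool) :
    setCell b y x v = b.set k (row.set j v) := by
  unfold setCell PySem.List.pyGet? PySem.List.pySetD PySem.List.pySet?
  simp [hk, hr, hj]

lemma countFalse_setCell_true_lt {b : List (List Bool)} {y x : Int}
    (h : getCell b y x = some false) :
    countFalse (setCell b y x true) < countFalse b := by
  obtain ⟨k, row, j, hk, hr, hj, hc⟩ := getCell_parts h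
  rw [setCell_eq_of_parts hk hr hj]
  have h1 := countFalse_set b k row (row.set j true) hr
  have h2 := count_false_set_true row j hc
  omega

lemma getCell_false_of_validMove {x y : Int} {b : List (List Bool)}
    (h : validMove x y b = true) : getCell b y x = some false := by
  unfold validMove at h
  simp only [Bool.and_eq_true, Bool.not_eq_true'] at h
  cases hg : getCell b y x with
  | none => rw [hg] at h; simp at h
  | some c => rw [hg] at h; simp at h; simp [h]

-- ===== PORT A =====
-- children pushed onto the stack (the for-loop over KNIGHT_MOVEMENTS; stack top = list head)
def pushChildren : List (Int × Int) → Int → Int → List (List Bool) → List (Int × Int × Bool) → List (Int × Int × Bool)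
  | [], _, _, _, states => states
  | (dx, dy) :: rest, x, y, used_tile, states =>
    let nx := x + dx
    let ny := y + dy
    pushChildren rest x y used_tile (if validMove nx ny used_tile then (nx, ny, false) :: states else states)

-- the while-loop; `fuel` is only a totality guard, proved sufficient below
def loopA : Nat → List (Int × Int × Bool) → List (List Bool) → Int → Int → Int
  | 0, _, _, _, result => result
  | _ + 1, [], _, _, result => result
  | fuel + 1, (x, y, going_back) :: states, used_tile, remaining_tiles, result =>
    if going_back then
      loopA fuel states (setCell used_tile y x false) (remaining_tiles + 1) result
    else
      let used' := setCell used_tile y x true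
      let rem' := remaining_tiles - 1
      if rem' = 0 then
        loopA fuel ((x, y, true) :: states) used' rem' (result + 1)
      else
        loopA fuel (pushChildren kMoves x y used' ((x, y, true) :: states)) used' rem' result

def knight_tours_from (x : Int) (y : Int) (used_tile : List (List Bool)) (remaining_tiles : Int) : Int :=
  loopA (9 ^ (countFalse used_tile + 1) + 3) [(x, y, false)] used_tile remaining_tiles 0

-- ===== PORT B =====
mutual
def knight_tours_from_alt (x : Int) (y : Int) (used_tile : List (List Bool)) (remaining_tiles : Int) : Int :=
  let used' := setCell used_tile y x true
  let rem' := remaining_tiles - 1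
  if rem' = 0 then 1
  else ktaForLoop kMoves x y used' rem' 0
termination_by (countFalse (setCell used_tile y x true), 9)
decreasing_by
  apply Prod.Lex.right
  decide

-- the for-loop over KNIGHT_MOVEMENTS accumulating `count`
def ktaForLoop (ms : List (Int × Int)) (x y : Int) (used' : List (List Bool)) (rem' : Int) (count : Int) : Int :=
  match ms with
  | [] => count
  | (dx, dy) :: rest =>
    let nx := x + dx
    let ny := y + dy
    if h : validMove nx ny used' = true then
      ktaForLoop rest x y used' rem' (count + knight_tours_from_alt nx ny used' rem')
    else
      ktaForLoop rest x y used' rem' count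
termination_by (countFalse used', ms.length)
decreasing_by
  · apply Prod.Lex.left
    exact countFalse_setCell_true_lt (getCell_false_of_validMove h)
  · apply Prod.Lex.right
    simp
  · apply Prod.Lex.right
    simp
end

-- ===== PRECONDITION & SPEC =====
-- Pre_ excludes inputs where Python raises IndexError: starting coordinates outside
-- Python's index range (A always raises), and boards with a row shorter than row 0, on
-- which A may raise depending on which squares the search reaches (on some such boards A
-- still returns, e.g. when the tour finishes before probing the short row; B returns the
-- same value there).
def Pre_knight_tours_from (x : Int) (y : Int) (used_tile : List (List Bool)) (remaining_tiles : Int) : Prop :=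
  (-(used_tile.length : Int) ≤ y ∧ y < (used_tile.length : Int)) ∧
  (-(((PySem.List.pyGet? used_tile y).getD []).length : Int) ≤ x ∧
    x < (((PySem.List.pyGet? used_tile y).getD []).length : Int)) ∧
  ∀ row ∈ used_tile, (used_tile.headD []).length ≤ row.length

instance (x : Int) (y : Int) (used_tile : List (List Bool)) (remaining_tiles : Int) : Decidable (Pre_knight_tours_from x y used_tile remaining_tiles) := by
  unfold Pre_knight_tours_from; infer_instance

def pvWitness_knight_tours_from : Int × Int × List (List Bool) × Int := (0, 0, [[false]], 1)

def Spec_knight_tours_from (x : Int) (y : Int) (used_tile : List (List Bool)) (remaining_tiles : Int) (out : Int) : Prop := out = knight_tours_from_alt x y used_tile remaining_tiles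
instance (x : Int) (y : Int) (used_tile : List (List Bool)) (remaining_tiles : Int) (out : Int) : Decidable (Spec_knight_tours_from x y used_tile remaining_tiles out) := by unfold Spec_knight_tours_from; infer_instance

-- ===== CLAIM (what is proved, stated in full; the proofs are below) =====
def Claim_equal_knight_tours_from : Prop := ∀ (x : Int) (y : Int) (used_tile : List (List Bool)) (remaining_tiles : Int), Dom_knight_tours_from x y used_tile remaining_tiles → Pre_knight_tours_from x y used_tile remaining_tiles → Spec_knight_tours_from x y used_tile remaining_tiles (knight_tours_from x y used_tile remaining_tiles)

-- ===== LEMMAS AND PROOFS =====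

-- small step lemmas for port A's loop
lemma loopA_nil (fuel : Nat) (b : List (List Bool)) (r res : Int) :
    loopA (fuel + 1) [] b r res = res := by
  simp [loopA]

lemma loopA_step_true (fuel : Nat) (x y : Int) (st : List (Int × Int × Bool))
    (b : List (List Bool)) (r res : Int) :
    loopA (fuel + 1) ((x, y, true) :: st) b r res
      = loopA fuel st (setCell b y x false) (r + 1) res := by
  simp [loopA]

lemma loopA_step_false (fuel : Nat) (x y : Int) (st : List (Int × Int × Bool))
    (b : List (List Bool)) (r res : Int) :
    loopA (fuel + 1) ((x, y, false) :: st) b r res =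
      if r - 1 = 0 then
        loopA fuel ((x, y, true) :: st) (setCell b y x true) (r - 1) (res + 1)
      else
        loopA fuel (pushChildren kMoves x y (setCell b y x true) ((x, y, true) :: st))
          (setCell b y x true) (r - 1) res := by
  simp [loopA]

-- index/update facts
lemma pyIdx?_lt {n : Nat} {i : Int} {k : Nat} (h : PySem.List.pyIdx? n i = some k) : k < n := by
  unfold PySem.List.pyIdx? at h
  split_ifs at h with h1 h2 h3 <;> simp_all <;> omega

lemma pyGet?_parts {α : Type} {xs : List α} {i : Int} {v : α}
    (h : PySem.List.pyGet? xs i = some v) :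
    ∃ k, PySem.List.pyIdx? xs.length i = some k ∧ xs[k]? = some v := by
  unfold PySem.List.pyGet? at h
  cases hk : PySem.List.pyIdx? xs.length i with
  | none => simp [hk] at h
  | some k => refine ⟨k, rfl, ?_⟩; simpa [hk] using h

lemma set_self_of_getElem? {α : Type} {xs : List α} {k : Nat} {v : α}
    (h : xs[k]? = some v) : xs.set k v = xs := by
  obtain ⟨hlt, he⟩ := List.getElem?_eq_some_iff.mp h
  subst he
  exact List.set_getElem_self hlt

lemma pyGet?_none_of_getCell_none {b : List (List Bool)} {y x : Int} {row : List Bool}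
    (hg : PySem.List.pyGet? b y = some row) (h : getCell b y x = none) :
    PySem.List.pyIdx? row.length x = none := by
  unfold getCell at h
  rw [hg] at h
  simp only [Option.bind_some] at h
  cases hj : PySem.List.pyIdx? row.length x with
  | none => rfl
  | some j =>
    exfalso
    have hlt := pyIdx?_lt hj
    unfold PySem.List.pyGet? at h
    rw [hj] at h
    simp only [Option.bind_some] at h
    rw [List.getElem?_eq_getElem hlt] at h
    simp at h

lemma setCell_none {b : List (List Bool)} {y x : Int} (v : Bool)
    (h : PySem.List.pyGet? b y = none) : setCell b y x v = b := by
  unfold setCell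
  rw [h]

lemma setCell_oob {b : List (List Bool)} {y x : Int} {row : List Bool} (v : Bool)
    (hg : PySem.List.pyGet? b y = some row)
    (hj : PySem.List.pyIdx? row.length x = none) : setCell b y x v = b := by
  obtain ⟨k, hk, hkr⟩ := pyGet?_parts hg
  simp only [setCell, hg, PySem.List.pySetD, PySem.List.pySet?, hj, hk, Option.map_none,
    Option.getD_none, Option.map_some, Option.getD_some]
  exact set_self_of_getElem? hkr

lemma setCell_noop {b : List (List Bool)} {y x : Int} {v : Bool}
    (h : getCell b y x = some v) : setCell b y x v = b := by
  obtain ⟨k, row, j, hk, hr, hj, hc⟩ := getCell_parts h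
  rw [setCell_eq_of_parts hk hr hj]
  rw [set_self_of_getElem? hc]
  exact set_self_of_getElem? hr

lemma setCell_setCell (b : List (List Bool)) (y x : Int) (v w : Bool) :
    setCell (setCell b y x v) y x w = setCell b y x w := by
  cases hg : PySem.List.pyGet? b y with
  | none => rw [setCell_none v hg]
  | some row =>
    obtain ⟨k, hk, hkr⟩ := pyGet?_parts hg
    cases hj : PySem.List.pyIdx? row.length x with
    | none => rw [setCell_oob v hg hj]
    | some j =>
      have hkl : k < b.length := (List.getElem?_eq_some_iff.mp hkr).1
      rw [setCell_eq_of_parts hk hkr hj]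
      have hk1 : PySem.List.pyIdx? (b.set k (row.set j v)).length y = some k := by
        rw [List.length_set]; exact hk
      have hr1 : (b.set k (row.set j v))[k]? = some (row.set j v) :=
        List.getElem?_set_self (by simpa using hkl)
      have hj1 : PySem.List.pyIdx? (row.set j v).length x = some j := by
        rw [List.length_set]; exact hj
      rw [setCell_eq_of_parts hk1 hr1 hj1, setCell_eq_of_parts hk hkr hj]
      rw [List.set_set, List.set_set]

lemma countFalse_setCell_le (b : List (List Bool)) (y x : Int) :
    countFalse (setCell b y x true) ≤ countFalse b := by
  cases hc : getCell b y x with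
  | some c =>
    cases c with
    | false => exact (countFalse_setCell_true_lt hc).le
    | true => rw [setCell_noop hc]
  | none =>
    cases hg : PySem.List.pyGet? b y with
    | none => rw [setCell_none true hg]
    | some row => rw [setCell_oob true hg (pyGet?_none_of_getCell_none hg hc)]

-- step-count of B's recursion = number of loop iterations A's stack machine spends
-- on the corresponding subtree (proof helper only)
mutual
def stepsB (x y : Int) (b : List (List Bool)) (r : Int) : Nat :=
  if r - 1 = 0 then 2
  else 2 + stepsList kMoves x y (setCell b y x true) (r - 1)
termination_by (countFalse (setCell b y x true), 9)
decreasing_by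
  apply Prod.Lex.right
  decide

def stepsList (ms : List (Int × Int)) (x y : Int) (used' : List (List Bool)) (rem' : Int) : Nat :=
  match ms with
  | [] => 0
  | (dx, dy) :: rest =>
    (if h : validMove (x + dx) (y + dy) used' = true then stepsB (x + dx) (y + dy) used' rem'
     else 0) + stepsList rest x y used' rem'
termination_by (countFalse used', ms.length)
decreasing_by
  · apply Prod.Lex.left
    exact countFalse_setCell_true_lt (getCell_false_of_validMove h)
  · apply Prod.Lex.right
    simp
end

-- the children a node pushes / recurses into
def childEntries (ms : List (Int × Int)) (x y : Int) (b' : List (List Bool)) : List (Int × Int) :=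
  ms.filterMap fun m => if validMove (x + m.1) (y + m.2) b' then some (x + m.1, y + m.2) else none

lemma validMove_of_mem_childEntries {ms : List (Int × Int)} {x y : Int}
    {b' : List (List Bool)} {c : Int × Int} (h : c ∈ childEntries ms x y b') :
    validMove c.1 c.2 b' = true := by
  obtain ⟨m, _, hm⟩ := List.mem_filterMap.mp h
  by_cases hv : validMove (x + m.1) (y + m.2) b' = true
  · rw [if_pos hv] at hm
    cases hm
    exact hv
  · rw [if_neg hv] at hm
    cases hm

lemma pushChildren_eq (x y : Int) (b' : List (List Bool)) :
    ∀ (ms : List (Int × Int)) (st : List (Int × Int × Bool)),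
    pushChildren ms x y b' st
      = ((childEntries ms x y b').map fun c => (c.1, c.2, false)).reverse ++ st := by
  intro ms
  induction ms with
  | nil => intro st; simp [pushChildren, childEntries]
  | cons m rest ih =>
    intro st
    obtain ⟨dx, dy⟩ := m
    have hstep : pushChildren ((dx, dy) :: rest) x y b' st
        = pushChildren rest x y b'
            (if validMove (x + dx) (y + dy) b' then (x + dx, y + dy, false) :: st else st) := by
      rw [pushChildren]
    rw [hstep, ih]
    by_cases hv : validMove (x + dx) (y + dy) b' = true
    · rw [if_pos hv]
      simp [childEntries, hv]
    · rw [if_neg hv]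
      simp [childEntries, hv]

lemma ktaForLoop_eq (x y : Int) (b' : List (List Bool)) (r' : Int) :
    ∀ (ms : List (Int × Int)) (count : Int),
    ktaForLoop ms x y b' r' count
      = count + ((childEntries ms x y b').map fun c => knight_tours_from_alt c.1 c.2 b' r').sum := by
  intro ms
  induction ms with
  | nil => intro count; simp [ktaForLoop, childEntries]
  | cons m rest ih =>
    intro count
    obtain ⟨dx, dy⟩ := m
    have hstep : ktaForLoop ((dx, dy) :: rest) x y b' r' count
        = if _h : validMove (x + dx) (y + dy) b' = true then
            ktaForLoop rest x y b' r' (count + knight_tours_from_alt (x + dx) (y + dy) b' r')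
          else ktaForLoop rest x y b' r' count := by
      rw [ktaForLoop]
    rw [hstep]
    by_cases hv : validMove (x + dx) (y + dy) b' = true
    · rw [dif_pos hv, ih]
      simp [childEntries, hv]
      ring
    · rw [dif_neg hv, ih]
      simp [childEntries, hv]

lemma stepsList_eq (x y : Int) (b' : List (List Bool)) (r' : Int) :
    ∀ (ms : List (Int × Int)),
    stepsList ms x y b' r'
      = ((childEntries ms x y b').map fun c => stepsB c.1 c.2 b' r').sum := by
  intro ms
  induction ms with
  | nil => simp [stepsList, childEntries]
  | cons m rest ih =>
    obtain ⟨dx, dy⟩ := m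
    have hstep : stepsList ((dx, dy) :: rest) x y b' r'
        = (if _h : validMove (x + dx) (y + dy) b' = true then stepsB (x + dx) (y + dy) b' r'
           else 0) + stepsList rest x y b' r' := by
      rw [stepsList]
    rw [hstep, ih]
    by_cases hv : validMove (x + dx) (y + dy) b' = true
    · rw [dif_pos hv]
      simp [childEntries, hv]
    · rw [dif_neg hv]
      simp [childEntries, hv]

-- the central simulation: one False entry on A's stack contributes exactly B's value
-- for that subtree, restores the board, and consumes exactly `stepsB` fuel
theorem loopA_subtree : ∀ (μ : Nat) (x y : Int) (b : List (List Bool)) (r : Int)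
    (st : List (Int × Int × Bool)) (res : Int) (fuel : Nat),
    countFalse (setCell b y x true) ≤ μ →
    loopA (stepsB x y b r + fuel) ((x, y, false) :: st) b r res
      = loopA fuel st (setCell b y x false) r (res + knight_tours_from_alt x y b r) := by
  intro μ
  induction μ using Nat.strong_induction_on with
  | _ μ IH =>
  intro x y b r st res fuel hμ
  by_cases hr : r - 1 = 0
  · have hs : stepsB x y b r = 2 := by rw [stepsB, if_pos hr]
    have h2 : stepsB x y b r + fuel = (fuel + 1) + 1 := by omega
    rw [h2, loopA_step_false, if_pos hr, loopA_step_true, setCell_setCell]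
    have haltv : knight_tours_from_alt x y b r = 1 := by
      rw [knight_tours_from_alt]
      simp only [hr, if_pos]
    have hrr : r - 1 + 1 = r := by omega
    rw [haltv, hrr]
  · -- interior node: children segment
    have hb' : countFalse (setCell b y x true) ≤ μ := hμ
    -- segment lemma: a block of valid children entries on top of the stack
    have seg : ∀ (cs : List (Int × Int)),
        (∀ c ∈ cs, validMove c.1 c.2 (setCell b y x true) = true) →
        ∀ (st' : List (Int × Int × Bool)) (res' : Int) (fuel' : Nat),
        loopA ((cs.map fun c => stepsB c.1 c.2 (setCell b y x true) (r - 1)).sum + fuel')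
            ((cs.map fun c => (c.1, c.2, false)) ++ st') (setCell b y x true) (r - 1) res'
          = loopA fuel' st' (setCell b y x true) (r - 1)
              (res' + (cs.map fun c => knight_tours_from_alt c.1 c.2 (setCell b y x true) (r - 1)).sum) := by
      intro cs
      induction cs with
      | nil => intro _ st' res' fuel'; simp
      | cons c cs' ihc =>
        intro hval st' res' fuel'
        have hvc : validMove c.1 c.2 (setCell b y x true) = true := hval c (by simp)
        have hcell : getCell (setCell b y x true) c.2 c.1 = some false :=
          getCell_false_of_validMove hvc
        have hmc : countFalse (setCell (setCell b y x true) c.2 c.1 true) < μ :=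
          lt_of_lt_of_le (countFalse_setCell_true_lt hcell) hb'
        have harr : ((c :: cs').map fun c => stepsB c.1 c.2 (setCell b y x true) (r - 1)).sum + fuel'
            = stepsB c.1 c.2 (setCell b y x true) (r - 1)
              + (((cs'.map fun c => stepsB c.1 c.2 (setCell b y x true) (r - 1)).sum) + fuel') := by
          simp [List.sum_cons]
          omega
        rw [harr]
        simp only [List.map_cons, List.cons_append]
        rw [IH _ hmc c.1 c.2 (setCell b y x true) (r - 1) _ res' _ le_rfl]
        rw [setCell_noop hcell]
        rw [ihc (fun c hc => hval c (by simp [hc])) st' _ fuel']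
        congr 1
        simp [List.sum_cons]
        ring
    have hsteps : stepsB x y b r = 2 + stepsList kMoves x y (setCell b y x true) (r - 1) := by
      rw [stepsB, if_neg hr]
    have harith : stepsB x y b r + fuel
        = (stepsList kMoves x y (setCell b y x true) (r - 1) + (fuel + 1)) + 1 := by
      rw [hsteps]; omega
    rw [harith, loopA_step_false, if_neg hr]
    rw [pushChildren_eq]
    rw [← List.map_reverse]
    have hsl : stepsList kMoves x y (setCell b y x true) (r - 1)
        = (((childEntries kMoves x y (setCell b y x true)).reverse).map
            fun c => stepsB c.1 c.2 (setCell b y x true) (r - 1)).sum := by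
      rw [stepsList_eq, List.map_reverse, List.sum_reverse_nat]
    rw [hsl]
    rw [seg _ (fun c hc => validMove_of_mem_childEntries (List.mem_reverse.mp hc)) _ res (fuel + 1)]
    rw [loopA_step_true, setCell_setCell]
    have hrr : r - 1 + 1 = r := by omega
    rw [hrr]
    congr 1
    have haltv : knight_tours_from_alt x y b r
        = ktaForLoop kMoves x y (setCell b y x true) (r - 1) 0 := by
      rw [knight_tours_from_alt]
      simp [hr]
    rw [haltv, ktaForLoop_eq, List.map_reverse, List.sum_reverse]
    ring

-- fuel bound: B's step count is at most 9^(free squares + 1)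
theorem stepsB_le : ∀ (μ : Nat) (x y : Int) (b : List (List Bool)) (r : Int),
    countFalse (setCell b y x true) ≤ μ → stepsB x y b r ≤ 9 ^ (μ + 1) := by
  intro μ
  induction μ using Nat.strong_induction_on with
  | _ μ IH =>
  intro x y b r hμ
  have hpow : 1 ≤ 9 ^ μ := Nat.one_le_pow _ _ (by norm_num)
  have hpow1 : 9 ^ (μ + 1) = 9 ^ μ * 9 := pow_succ 9 μ
  by_cases hr : r - 1 = 0
  · rw [stepsB, if_pos hr]
    omega
  · rw [stepsB, if_neg hr]
    rw [stepsList_eq]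
    set b' := setCell b y x true with hb'def
    set ce := childEntries kMoves x y b' with hce
    by_cases hne : ce = []
    · rw [hne]
      simp
      omega
    · obtain ⟨c0, hc0⟩ := List.exists_mem_of_ne_nil ce hne
      have hμ1 : 1 ≤ μ := by
        have hv0 : validMove c0.1 c0.2 b' = true := validMove_of_mem_childEntries (hce ▸ hc0)
        have := countFalse_setCell_true_lt (getCell_false_of_validMove hv0)
        omega
      have hbound : ∀ s ∈ ce.map fun c => stepsB c.1 c.2 b' (r - 1), s ≤ 9 ^ μ := by
        intro s hs
        obtain ⟨c, hc, hcs'⟩ := List.mem_map.mp hs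
        have hv : validMove c.1 c.2 b' = true := validMove_of_mem_childEntries (hce ▸ hc)
        have hmc : countFalse (setCell b' c.2 c.1 true) < countFalse b' :=
          countFalse_setCell_true_lt (getCell_false_of_validMove hv)
        have hlt : countFalse (setCell b' c.2 c.1 true) < μ := lt_of_lt_of_le hmc hμ
        have := IH _ hlt c.1 c.2 b' (r - 1) le_rfl
        have hple : 9 ^ (countFalse (setCell b' c.2 c.1 true) + 1) ≤ 9 ^ μ :=
          Nat.pow_le_pow_right (by norm_num) (by omega)
        omega
      have hsum := List.sum_le_card_nsmul _ _ hbound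
      simp only [smul_eq_mul] at hsum
      have hlen : (ce.map fun c => stepsB c.1 c.2 b' (r - 1)).length ≤ 8 := by
        rw [List.length_map, hce]
        have := List.length_filterMap_le
          (fun m => if validMove (x + m.1) (y + m.2) b' then some (x + m.1, y + m.2) else none) kMoves
        simpa [childEntries, kMoves] using this
      have h9 : 9 ≤ 9 ^ μ := by
        calc 9 = 9 ^ 1 := by norm_num
        _ ≤ 9 ^ μ := Nat.pow_le_pow_right (by norm_num) hμ1
      have hs8 : (ce.map fun c => stepsB c.1 c.2 b' (r - 1)).sum ≤ 8 * 9 ^ μ :=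
        le_trans hsum (Nat.mul_le_mul_right _ hlen)
      omega

theorem knight_tours_from_eq_alt (x : Int) (y : Int) (b : List (List Bool)) (r : Int) :
    knight_tours_from x y b r = knight_tours_from_alt x y b r := by
  unfold knight_tours_from
  have hle : countFalse (setCell b y x true) ≤ countFalse b := countFalse_setCell_le b y x
  have hs : stepsB x y b r ≤ 9 ^ (countFalse b + 1) :=
    stepsB_le (countFalse b) x y b r hle
  obtain ⟨k, hk⟩ : ∃ k, 9 ^ (countFalse b + 1) + 3 = stepsB x y b r + (k + 1) :=
    ⟨9 ^ (countFalse b + 1) + 2 - stepsB x y b r, by omega⟩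
  rw [hk, loopA_subtree (countFalse (setCell b y x true)) x y b r [] 0 (k + 1) le_rfl,
    loopA_nil]
  omega

-- ===== VERDICT (by name: the statement is the Claim_ definition above) =====
theorem knight_tours_from_spec : Claim_equal_knight_tours_from := by
  intro x y used_tile remaining_tiles _ _
  unfold Spec_knight_tours_from
  exact knight_tours_from_eq_alt x y used_tile remaining_tiles
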